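-- pv_equiv track=rewrite | github.com/Benhooky/ItEge | 2024-2025/Sergey/23/lastUsedExample.py | f
-- ===== SOURCE A (Python) =====
-- def f(from1, to1, lastUsedCmd):
--     if from1==to1:
--         return 1
--     elif from1>to1:
--         return 0
--     elif lastUsedCmd=='B':
--         return f(from1+2, to1, 'A')+ f(from1**2,to1,'C')
--     else:
--         return f(from1+2, to1, 'A')+f(from1+5,to1,'B')+ f(from1**2,to1,'C')
-- ===== SOURCE B (Python) =====
-- def f(from1, to1, lastUsedCmd):
--     # Bottom-up DP over x = to1-1 .. from1 instead of branching recursion.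
--     if from1 >= to1:
--         return 1 if from1 == to1 else 0
--     g = {to1: 1}  # number of sequences from x when the previous command was not 'B'
--     h = {to1: 1}  # number of sequences from x when the previous command was 'B'
--     x = to1 - 1
--     while x >= from1:
--         a = g.get(x + 2, 0)
--         c = g.get(x * x, 0)
--         h[x] = a + c
--         g[x] = a + h.get(x + 5, 0) + c
--         x -= 1
--     return h[from1] if lastUsedCmd == 'B' else g[from1]
-- ===== Notes on version B (the rewrite author's own statement) =====
-- stated objective: alternative
-- what changed: A's three-way branching recursion is replaced by a bottom-up dynamic program: one loop from to1 down to from1 filling two dictionaries (count after command 'B' / after any other command), so each state is computed once.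
-- outside the precondition, e.g. on f(-1, 1, 'A'): A returns 2, B returns 2; on f(0, 5, 'A'): A raises RecursionError, B returns 1
import Mathlib
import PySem

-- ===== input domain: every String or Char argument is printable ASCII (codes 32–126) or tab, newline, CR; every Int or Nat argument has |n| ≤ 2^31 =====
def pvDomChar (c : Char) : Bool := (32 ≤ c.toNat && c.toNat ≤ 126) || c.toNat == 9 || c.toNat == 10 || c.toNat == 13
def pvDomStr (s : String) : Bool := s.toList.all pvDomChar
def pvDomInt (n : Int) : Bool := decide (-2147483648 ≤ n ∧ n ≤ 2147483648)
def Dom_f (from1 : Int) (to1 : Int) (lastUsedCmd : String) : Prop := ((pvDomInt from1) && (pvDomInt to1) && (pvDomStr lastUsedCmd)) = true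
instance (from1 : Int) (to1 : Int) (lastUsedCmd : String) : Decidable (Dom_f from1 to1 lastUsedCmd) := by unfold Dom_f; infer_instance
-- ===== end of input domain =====

-- B replaces A's exponential branching recursion by a bottom-up DP loop from to1 down to from1
-- (two dictionaries: value after command 'B' / after any other command); objective: alternative algorithm.

-- ===== PORT A =====
-- A's recursion does not terminate for every input (from1*from1 is a fixed point at 0 and 1),
-- so the literal transliteration is fuel-indexed; on Pre_f the fuel (gap+1) is always sufficient
-- (proved by fFuel_stable below), so f computes exactly what A computes there.
def fFuel : Nat → Int → Int → String → Int
  | 0, _, _, _ => 0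
  | n+1, from1, to1, lastUsedCmd =>
    if from1 = to1 then 1
    else if from1 > to1 then 0
    else if lastUsedCmd == "B" then
      fFuel n (from1+2) to1 "A" + fFuel n (from1*from1) to1 "C"
    else
      fFuel n (from1+2) to1 "A" + fFuel n (from1+5) to1 "B" + fFuel n (from1*from1) to1 "C"

def f (from1 : Int) (to1 : Int) (lastUsedCmd : String) : Int :=
  fFuel ((to1 - from1).toNat + 1) from1 to1 lastUsedCmd

-- ===== PORT B =====
-- the while-loop of Source B: n iterations, x counts down; g/h are the two dicts
def loopB (to1 : Int) : Nat → Int → PySem.Dict Int Int → PySem.Dict Int Int →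
    PySem.Dict Int Int × PySem.Dict Int Int
  | 0, _, g, h => (g, h)
  | n+1, x, g, h =>
    let a := g.getD (x+2) 0
    let c := g.getD (x*x) 0
    let h' := h.insert x (a + c)
    let g' := g.insert x (a + h'.getD (x+5) 0 + c)
    loopB to1 n (x-1) g' h'

def f_alt (from1 : Int) (to1 : Int) (lastUsedCmd : String) : Int :=
  if to1 ≤ from1 then (if from1 = to1 then 1 else 0)
  else
    let g0 : PySem.Dict Int Int := PySem.Dict.empty.insert to1 1
    let h0 : PySem.Dict Int Int := PySem.Dict.empty.insert to1 1
    let p := loopB to1 (to1 - from1).toNat (to1 - 1) g0 h0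
    -- h[from1] / g[from1]: the key from1 is always present after the loop, so getD is exact
    if lastUsedCmd == "B" then p.2.getD from1 0 else p.1.getD from1 0

-- ===== PRECONDITION & SPEC =====
-- Pre_f excludes from1 < min(to1, 2): there A's recursion can reach the squaring fixed points 0/1
-- below to1 and raises RecursionError on many such inputs (e.g. (0,5,'A')); the whole region is
-- excluded, including a fringe of negative from1 where A happens to return (e.g. (-1,1,'A') → 2,
-- where B returns 2 as well).
def Pre_f (from1 : Int) (to1 : Int) (lastUsedCmd : String) : Prop :=
  to1 ≤ from1 ∨ 2 ≤ from1
instance (from1 : Int) (to1 : Int) (lastUsedCmd : String) : Decidable (Pre_f from1 to1 lastUsedCmd) := by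
  unfold Pre_f; infer_instance
def pvWitness_f : Int × Int × String := (2, 10, "A")
def Spec_f (from1 : Int) (to1 : Int) (lastUsedCmd : String) (out : Int) : Prop := out = f_alt from1 to1 lastUsedCmd
instance (from1 : Int) (to1 : Int) (lastUsedCmd : String) (out : Int) : Decidable (Spec_f from1 to1 lastUsedCmd out) := by unfold Spec_f; infer_instance

-- ===== CLAIM (what is proved, stated in full; the proofs are below) =====
def Claim_equal_f : Prop := ∀ (from1 : Int) (to1 : Int) (lastUsedCmd : String), Dom_f from1 to1 lastUsedCmd → Pre_f from1 to1 lastUsedCmd → Spec_f from1 to1 lastUsedCmd (f from1 to1 lastUsedCmd)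

-- ===== LEMMAS AND PROOFS =====

-- On Pre_f the chain of recursive calls keeps 2 ≤ x (or x ≥ to1), so the gap shrinks by ≥ 2
-- per call and any fuel above the gap gives the same value.
theorem fFuel_stable (to1 : Int) (n : Nat) : ∀ (m : Nat) (x : Int) (c : String),
    (to1 - x).toNat < n → (to1 - x).toNat < m → (2 ≤ x ∨ to1 ≤ x) →
    fFuel n x to1 c = fFuel m x to1 c := by
  induction n with
  | zero => intro m x c h1 _ _; omega
  | succ n ih =>
    intro m x c h1 h2 hx
    obtain ⟨m, rfl⟩ : ∃ m', m = m' + 1 := ⟨m - 1, by omega⟩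
    by_cases he : x = to1
    · simp [fFuel, he]
    · by_cases hgt : x > to1
      · simp [fFuel, he, hgt]
      · have h2x : 2 ≤ x := by
          rcases hx with h | h
          · exact h
          · omega
        have hsq : x + 2 ≤ x * x := by nlinarith
        have hlt : x < to1 := by omega
        simp only [fFuel, if_neg he, if_neg hgt]
        have e1 := ih m (x+2) "A" (by omega) (by omega) (Or.inl (by omega))
        have e2 := ih m (x+5) "B" (by omega) (by omega) (Or.inl (by omega))
        have e3 := ih m (x*x) "C" (by omega) (by omega) (Or.inl (by omega))
        by_cases hc : c == "B" <;> simp [hc, e1, e2, e3]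

-- only whether the command is "B" matters
theorem fFuel_cmd (n : Nat) (x to1 : Int) (c : String) (hc : (c == "B") = false) :
    fFuel n x to1 c = fFuel n x to1 "A" := by
  cases n <;> simp [fFuel, hc]

theorem f_cmd (x to1 : Int) (c : String) (hc : (c == "B") = false) :
    f x to1 c = f x to1 "A" := fFuel_cmd _ _ _ _ hc

theorem f_base_eq (x to1 : Int) (c : String) (h : x = to1) : f x to1 c = 1 := by
  simp [f, fFuel, h]

theorem f_base_gt (x to1 : Int) (c : String) (h : to1 < x) : f x to1 c = 0 := by
  have : x ≠ to1 := by omega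
  simp [f, fFuel, this, h]

theorem fFuel_succ (n : Nat) (x to1 : Int) (c : String) :
    fFuel (n+1) x to1 c =
      (if x = to1 then 1
       else if x > to1 then 0
       else if c == "B" then
         fFuel n (x+2) to1 "A" + fFuel n (x*x) to1 "C"
       else
         fFuel n (x+2) to1 "A" + fFuel n (x+5) to1 "B" + fFuel n (x*x) to1 "C") := rfl

theorem f_rec (x to1 : Int) (h2 : 2 ≤ x) (hlt : x < to1) (c : String) :
    f x to1 c = (if c == "B"
      then f (x+2) to1 "A" + f (x*x) to1 "A"
      else f (x+2) to1 "A" + f (x+5) to1 "B" + f (x*x) to1 "A") := by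
  have hsq : x + 2 ≤ x * x := by nlinarith
  have he : x ≠ to1 := by omega
  have hgt : ¬ x > to1 := by omega
  have hstep : f x to1 c = fFuel ((to1 - x).toNat + 1 + 1) x to1 c :=
    fFuel_stable to1 _ _ _ _ (by omega) (by omega) (Or.inl h2)
  have e1 : fFuel ((to1 - x).toNat + 1) (x+2) to1 "A" = f (x+2) to1 "A" :=
    fFuel_stable to1 _ _ _ _ (by omega) (by omega) (Or.inl (by omega))
  have e2 : fFuel ((to1 - x).toNat + 1) (x+5) to1 "B" = f (x+5) to1 "B" :=
    fFuel_stable to1 _ _ _ _ (by omega) (by omega) (Or.inl (by omega))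
  have e3 : fFuel ((to1 - x).toNat + 1) (x*x) to1 "C" = f (x*x) to1 "A" :=
    (fFuel_stable to1 _ _ _ _ (by omega) (by omega) (Or.inl (by omega))).trans
      (f_cmd (x*x) to1 "C" rfl)
  rw [hstep, fFuel_succ, if_neg he, if_neg hgt]
  by_cases hcb : c == "B"
  · rw [if_pos hcb, if_pos hcb, e1, e3]
  · rw [if_neg hcb, if_neg hcb, e1, e2, e3]

-- loop invariant: after processing down to x+1, both dicts agree with f above x
theorem loopB_inv (to1 : Int) (n : Nat) : ∀ (x : Int) (g h : PySem.Dict Int Int),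
    2 ≤ x - n + 1 → x < to1 →
    (∀ y : Int, x < y → g.getD y 0 = f y to1 "A" ∧ h.getD y 0 = f y to1 "B") →
    ∀ y : Int, x - n < y →
      (loopB to1 n x g h).1.getD y 0 = f y to1 "A" ∧
      (loopB to1 n x g h).2.getD y 0 = f y to1 "B" := by
  induction n with
  | zero =>
    intro x g h _ _ inv y hy
    simpa [loopB] using inv y (by push_cast at hy ⊢; omega)
  | succ n ih =>
    intro x g h h2 hlt inv y hy
    have h2x : 2 ≤ x := by push_cast at h2; omega
    have hsq : x + 2 ≤ x * x := by nlinarith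
    have ha := (inv (x+2) (by omega)).1
    have hc := (inv (x*x) (by omega)).1
    have hb5 := (inv (x+5) (by omega)).2
    simp only [loopB]
    apply ih (x-1) _ _ (by push_cast at h2 ⊢; omega) (by omega) _ y (by push_cast at hy ⊢; omega)
    intro z hz
    by_cases hzx : z = x
    · subst hzx
      constructor
      · rw [PySem.Dict.getD_insert_self,
          PySem.Dict.getD_insert_of_ne _ _ _ (show z + 5 ≠ z by omega),
          ha, hc, hb5, f_rec z to1 h2x hlt "A"]
        simp
      · rw [PySem.Dict.getD_insert_self, ha, hc, f_rec z to1 h2x hlt "B"]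
        simp
    · rw [PySem.Dict.getD_insert_of_ne _ _ _ hzx, PySem.Dict.getD_insert_of_ne _ _ _ hzx]
      exact inv z (by omega)

-- ===== VERDICT (by name: the statement is the Claim_ definition above) =====
theorem f_spec : Claim_equal_f := by
  intro from1 to1 c _ hpre
  unfold Spec_f f_alt
  by_cases hge : to1 ≤ from1
  · rw [if_pos hge]
    by_cases he : from1 = to1
    · rw [if_pos he, f_base_eq _ _ _ he]
    · rw [if_neg he, f_base_gt _ _ _ (by omega)]
  · rw [if_neg hge]
    have h2 : 2 ≤ from1 := by
      rcases hpre with h | h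
      · omega
      · exact h
    have hlt : from1 < to1 := by omega
    have inv0 : ∀ y : Int, to1 - 1 < y →
        (PySem.Dict.empty.insert to1 (1:Int)).getD y 0 = f y to1 "A" ∧
        (PySem.Dict.empty.insert to1 (1:Int)).getD y 0 = f y to1 "B" := by
      intro y hy
      by_cases hye : y = to1
      · subst hye
        rw [PySem.Dict.getD_insert_self]
        exact ⟨(f_base_eq _ _ _ rfl).symm, (f_base_eq _ _ _ rfl).symm⟩
      · rw [PySem.Dict.getD_insert_of_ne _ _ _ hye, PySem.Dict.getD_empty]
        exact ⟨(f_base_gt _ _ _ (by omega)).symm, (f_base_gt _ _ _ (by omega)).symm⟩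
    have main := loopB_inv to1 (to1 - from1).toNat (to1 - 1)
      (PySem.Dict.empty.insert to1 1) (PySem.Dict.empty.insert to1 1)
      (by omega) (by omega) inv0 from1 (by omega)
    by_cases hcb : c == "B"
    · have hc : c = "B" := by simpa using hcb
      subst hc
      rw [if_pos hcb]
      exact main.2.symm
    · rw [if_neg hcb, f_cmd _ _ _ (by simpa using hcb)]
      exact main.1.symm
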